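-- pv_equiv track=rewrite | github.com/luevb/python-programms | lab_3_sort/src/shaker_sort.py | shaker_sort_with_stats
-- ===== SOURCE A (Python) =====
-- def shaker_sort_with_stats(array):
--     # Сортирует список и собирает статистику выполнения
--     result = array.copy()
--
--     if len(result) <= 1:
--         return result, {'comparisons': 0, 'swaps': 0, 'passes': 0}
--
--     left = 0
--     right = len(result) - 1
--
--     # Статистика
--     comparisons = 0  # количество сравнений элементов
--     swaps = 0  # количество обменов
--     passes = 0  # количество проходов по массиву
--
--     while left < right:
--         # Проход слева направо
--         passes += 1
--         i = left
--         while i < right: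
--             comparisons += 1
--             if result[i] > result[i + 1]:
--                 # Меняем местами
--                 result[i], result[i + 1] = result[i + 1], result[i]
--                 swaps += 1
--             i += 1
--         right -= 1
--
--         # Проверка, не закончилась ли сортировка
--         if left >= right:
--             break
--
--         # Проход справа налево
--         passes += 1
--         i = right
--         while i > left:
--             comparisons += 1
--             if result[i - 1] > result[i]:
--                 result[i - 1], result[i] = result[i], result[i - 1]
--                 swaps += 1
--             i -= 1
--         left += 1
--
--     # Формируем статистику
--     statistics = {
--         'comparisons': comparisons,
--         'swaps': swaps,
--         'passes': passes
--     }
--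
--     return result, statistics
-- ===== SOURCE B (Python) =====
-- def _inversions(xs):
--     # number of pairs (i, j), i < j, with xs[i] > xs[j]
--     if not xs:
--         return 0
--     head, tail = xs[0], xs[1:]
--     return sum(1 for y in tail if head > y) + _inversions(tail)
--
--
-- def shaker_sort_with_stats(array):
--     # Closed-form stats: shaker sort without early exit always does
--     # n*(n-1)/2 comparisons in n-1 passes, and each adjacent swap fixes
--     # exactly one inversion, so swaps == inversion count.
--     n = len(array)
--     statistics = {
--         'comparisons': n * (n - 1) // 2,
--         'swaps': _inversions(array),
--         'passes': max(n - 1, 0)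
--     }
--     return sorted(array), statistics
-- ===== Notes on version B (the rewrite author's own statement) =====
-- stated objective: simpler
-- what changed: B never simulates the shaker sort: it returns sorted(array), counts swaps as the number of inversions (each adjacent swap fixes exactly one), and emits the closed forms n*(n-1)//2 comparisons and max(n-1,0) passes that A's loop (which has no early exit) always performs.
import Mathlib
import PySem

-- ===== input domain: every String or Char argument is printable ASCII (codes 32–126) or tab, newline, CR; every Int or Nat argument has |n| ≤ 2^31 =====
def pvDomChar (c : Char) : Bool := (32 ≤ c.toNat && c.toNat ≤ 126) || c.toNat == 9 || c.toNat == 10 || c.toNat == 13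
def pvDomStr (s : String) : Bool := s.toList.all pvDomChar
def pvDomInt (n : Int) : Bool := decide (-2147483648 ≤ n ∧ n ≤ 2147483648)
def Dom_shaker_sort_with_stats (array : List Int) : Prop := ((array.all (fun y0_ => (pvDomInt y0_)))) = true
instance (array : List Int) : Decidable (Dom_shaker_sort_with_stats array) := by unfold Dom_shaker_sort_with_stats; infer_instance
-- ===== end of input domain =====

-- B replaces the shaker-sort simulation by sorted(array) plus direct stats (inversion count
-- for swaps, closed forms for comparisons and passes): simpler, no mutation loop.


-- ===== PORT A =====
-- Inner left-to-right pass: `while i < right: compare result[i], result[i+1], maybe swap`.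
-- Indices are always in range during A's run, so the total pyGetD/pySetD forms are exact.
def pvFwd (res : List Int) (right i comp swaps : Int) : List Int × Int × Int :=
  if h : i < right then
    let a := PySem.List.pyGetD res i 0
    let b := PySem.List.pyGetD res (i + 1) 0
    if a > b then
      pvFwd (PySem.List.pySetD (PySem.List.pySetD res i b) (i + 1) a) right (i + 1) (comp + 1) (swaps + 1)
    else
      pvFwd res right (i + 1) (comp + 1) swaps
  else (res, comp, swaps)
termination_by (right - i).toNat
decreasing_by all_goals omega

-- Inner right-to-left pass: `while i > left: compare result[i-1], result[i], maybe swap`.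
def pvBwd (res : List Int) (left i comp swaps : Int) : List Int × Int × Int :=
  if h : left < i then
    let a := PySem.List.pyGetD res (i - 1) 0
    let b := PySem.List.pyGetD res i 0
    if a > b then
      pvBwd (PySem.List.pySetD (PySem.List.pySetD res (i - 1) b) i a) left (i - 1) (comp + 1) (swaps + 1)
    else
      pvBwd res left (i - 1) (comp + 1) swaps
  else (res, comp, swaps)
termination_by (i - left).toNat
decreasing_by all_goals omega

-- Outer `while left < right` loop; returns (result, comparisons, swaps, passes).
def pvOuter (res : List Int) (left right comp swaps passes : Int) : List Int × Int × Int × Int :=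
  if h : left < right then
    let r1 := pvFwd res right left comp swaps
    if h2 : left ≥ right - 1 then
      (r1.1, r1.2.1, r1.2.2, passes + 1)
    else
      let r2 := pvBwd r1.1 left (right - 1) r1.2.1 r1.2.2
      pvOuter r2.1 (left + 1) (right - 1) r2.2.1 r2.2.2 (passes + 2)
  else (res, comp, swaps, passes)
termination_by (right - left).toNat
decreasing_by omega

def shaker_sort_with_stats (array : List Int) : List Int × (List (String × Int)) :=
  let result := array
  if PySem.List.len result ≤ 1 then
    (result, [("comparisons", 0), ("swaps", 0), ("passes", 0)])
  else
    let r := pvOuter result 0 (PySem.List.len result - 1) 0 0 0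
    (r.1, [("comparisons", r.2.1), ("swaps", r.2.2.1), ("passes", r.2.2.2)])

-- ===== PORT B =====
-- `while xs: head, xs = xs[0], xs[1:]; total += sum(1 for y in xs if head > y)`
def altInvAux : List Int → Int → Int
  | [], total => total
  | x :: rest, total => altInvAux rest (total + (rest.countP (fun y => decide (x > y)) : Int))

def shaker_sort_with_stats_alt (array : List Int) : List Int × (List (String × Int)) :=
  let n : Int := PySem.List.len array
  (PySem.List.sorted array (fun x => x) false,
   [("comparisons", PySem.Int.floordiv (n * (n - 1)) 2),
    ("swaps", altInvAux array 0),
    ("passes", max (n - 1) 0)])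

-- ===== PRECONDITION & SPEC =====
def Spec_shaker_sort_with_stats (array : List Int) (out : List Int × (List (String × Int))) : Prop := out = shaker_sort_with_stats_alt array
instance (array : List Int) (out : List Int × (List (String × Int))) : Decidable (Spec_shaker_sort_with_stats array out) := by unfold Spec_shaker_sort_with_stats; infer_instance

-- ===== CLAIM (what is proved, stated in full; the proofs are below) =====
def Claim_equal_shaker_sort_with_stats : Prop := ∀ (array : List Int), Dom_shaker_sort_with_stats array → Spec_shaker_sort_with_stats array (shaker_sort_with_stats array)

-- ===== LEMMAS AND PROOFS =====

-- Pure model of one forward pass (bubbles a maximum to the end) and its swap count.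
def bubF : List Int → List Int
  | [] => []
  | [x] => [x]
  | a :: b :: t => if a > b then b :: bubF (a :: t) else a :: bubF (b :: t)
termination_by xs => xs.length
decreasing_by all_goals simp

def swF : List Int → Nat
  | [] => 0
  | [_] => 0
  | a :: b :: t => if a > b then swF (a :: t) + 1 else swF (b :: t)
termination_by xs => xs.length
decreasing_by all_goals simp

-- Pure model of one backward pass, stated on the REVERSED segment ys (front of ys = right
-- end of the segment): keeps the max of each compared pair in place, carries the min along.
def bubB : List Int → List Int
  | [] => []
  | [x] => [x]
  | a :: b :: t => if b > a then b :: bubB (a :: t) else a :: bubB (b :: t)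
termination_by xs => xs.length
decreasing_by all_goals simp

def swB : List Int → Nat
  | [] => 0
  | [_] => 0
  | a :: b :: t => if b > a then swB (a :: t) + 1 else swB (b :: t)
termination_by xs => xs.length
decreasing_by all_goals simp

-- Inversion counts: inv = #{(i,j) | i < j, x_i > x_j};  invR = #{(i,j) | i < j, x_i < x_j}.
def inv : List Int → Nat
  | [] => 0
  | x :: xs => xs.countP (fun y => decide (x > y)) + inv xs

def invR : List Int → Nat
  | [] => 0
  | x :: xs => xs.countP (fun y => decide (x < y)) + invR xs

lemma bubF_perm (xs : List Int) : (bubF xs).Perm xs := by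
  induction xs using bubF.induct with
  | case1 => simp [bubF]
  | case2 x => simp [bubF]
  | case3 a b t hab ih =>
      simp only [bubF, if_pos hab]
      exact (ih.cons b).trans (List.Perm.swap a b t)
  | case4 a b t hab ih =>
      simp only [bubF, if_neg hab]
      exact ih.cons a

lemma bubB_perm (xs : List Int) : (bubB xs).Perm xs := by
  induction xs using bubB.induct with
  | case1 => simp [bubB]
  | case2 x => simp [bubB]
  | case3 a b t hab ih =>
      simp only [bubB, if_pos hab]
      exact (ih.cons b).trans (List.Perm.swap a b t)
  | case4 a b t hab ih =>
      simp only [bubB, if_neg hab]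
      exact ih.cons a

lemma bubF_last (xs : List Int) (hne : xs ≠ []) :
    ∃ ys M, bubF xs = ys ++ [M] ∧ ∀ y ∈ xs, y ≤ M := by
  induction xs using bubF.induct with
  | case1 => simp at hne
  | case2 x => exact ⟨[], x, by simp [bubF], by simp⟩
  | case3 a b t hab ih =>
      obtain ⟨ys, M, he, hle⟩ := ih (by simp)
      refine ⟨b :: ys, M, by simp [bubF, hab, he], ?_⟩
      intro y hy
      have ha : a ≤ M := hle a (by simp)
      simp only [List.mem_cons] at hy
      rcases hy with rfl | rfl | hy
      · exact ha
      · omega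
      · exact hle y (by simp [hy])
  | case4 a b t hab ih =>
      obtain ⟨ys, M, he, hle⟩ := ih (by simp)
      refine ⟨a :: ys, M, by simp [bubF, hab, he], ?_⟩
      intro y hy
      have hb : b ≤ M := hle b (by simp)
      simp only [List.mem_cons] at hy
      rcases hy with rfl | rfl | hy
      · omega
      · exact hb
      · exact hle y (by simp [hy])

lemma bubB_last (xs : List Int) (hne : xs ≠ []) :
    ∃ zs m0, bubB xs = zs ++ [m0] ∧ ∀ y ∈ xs, m0 ≤ y := by
  induction xs using bubB.induct with
  | case1 => simp at hne
  | case2 x => exact ⟨[], x, by simp [bubB], by simp⟩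
  | case3 a b t hab ih =>
      obtain ⟨zs, m0, he, hle⟩ := ih (by simp)
      refine ⟨b :: zs, m0, by simp [bubB, hab, he], ?_⟩
      intro y hy
      have ha : m0 ≤ a := hle a (by simp)
      simp only [List.mem_cons] at hy
      rcases hy with rfl | rfl | hy
      · exact ha
      · omega
      · exact hle y (by simp [hy])
  | case4 a b t hab ih =>
      obtain ⟨zs, m0, he, hle⟩ := ih (by simp)
      refine ⟨a :: zs, m0, by simp [bubB, hab, he], ?_⟩
      intro y hy
      have hb : m0 ≤ b := hle b (by simp)
      simp only [List.mem_cons] at hy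
      rcases hy with rfl | rfl | hy
      · omega
      · exact hb
      · exact hle y (by simp [hy])

lemma bubF_inv (xs : List Int) : inv xs = swF xs + inv (bubF xs) := by
  induction xs using bubF.induct with
  | case1 => simp [bubF, swF, inv]
  | case2 x => simp [bubF, swF, inv]
  | case3 a b t hab ih =>
      have hba : ¬ (b > a) := by omega
      have hc := (bubF_perm (a :: t)).countP_eq (fun y => decide (b > y))
      simp only [inv] at ih
      simp only [inv, swF, bubF, if_pos hab]
      simp [hab, hba] at ih hc ⊢
      omega
  | case4 a b t hab ih =>
      have hc := (bubF_perm (b :: t)).countP_eq (fun y => decide (a > y))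
      simp only [inv] at ih
      simp only [inv, swF, bubF, if_neg hab]
      simp [hab] at ih hc ⊢
      omega

lemma bubB_invR (xs : List Int) : invR xs = swB xs + invR (bubB xs) := by
  induction xs using bubB.induct with
  | case1 => simp [bubB, swB, invR]
  | case2 x => simp [bubB, swB, invR]
  | case3 a b t hab ih =>
      have hba : ¬ (b < a) := by omega
      have hc := (bubB_perm (a :: t)).countP_eq (fun y => decide (b < y))
      simp only [invR] at ih
      simp only [invR, swB, bubB, if_pos hab]
      simp [hab, hba, gt_iff_lt] at ih hc ⊢
      omega
  | case4 a b t hab ih =>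
      have hc := (bubB_perm (b :: t)).countP_eq (fun y => decide (a < y))
      simp only [invR] at ih
      simp only [invR, swB, bubB, if_neg hab]
      simp [hab, gt_iff_lt] at ih hc ⊢
      omega

lemma inv_append_singleton (ys : List Int) (a : Int) :
    inv (ys ++ [a]) = inv ys + ys.countP (fun y => decide (y > a)) := by
  induction ys with
  | nil => simp [inv]
  | cons x ys ih =>
      simp only [List.cons_append, inv, ih, List.countP_append, List.countP_cons]
      simp [gt_iff_lt]
      omega

lemma invR_append_singleton (ys : List Int) (a : Int) :
    invR (ys ++ [a]) = invR ys + ys.countP (fun y => decide (y < a)) := by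
  induction ys with
  | nil => simp [invR]
  | cons x ys ih =>
      simp only [List.cons_append, invR, ih, List.countP_append, List.countP_cons]
      simp
      omega

lemma inv_reverse (xs : List Int) : inv xs.reverse = invR xs := by
  induction xs with
  | nil => simp [inv, invR]
  | cons x xs ih =>
      have hc := (xs.reverse_perm).countP_eq (fun y => decide (y > x))
      simp only [List.reverse_cons, inv_append_singleton, ih, invR, hc]
      simp [gt_iff_lt]
      omega

-- Reading / writing at position pre.length of pre ++ x :: rest.
lemma pyGetD_at_len (pre rest : List Int) (x d : Int) :
    PySem.List.pyGetD (pre ++ x :: rest) (pre.length : Int) d = x := by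
  simp [List.getD]

lemma pyGetD_at_len1 (pre rest : List Int) (x y d : Int) :
    PySem.List.pyGetD (pre ++ x :: y :: rest) ((pre.length : Int) + 1) d = y := by
  have h1 : ((pre.length : Int) + 1) = (((pre ++ [x]).length : Nat) : Int) := by simp
  have h2 : pre ++ x :: y :: rest = (pre ++ [x]) ++ y :: rest := by simp
  rw [h1, h2, pyGetD_at_len]

lemma swap_at_len (pre rest : List Int) (x y : Int) :
    PySem.List.pySetD (PySem.List.pySetD (pre ++ x :: y :: rest) (pre.length : Int) y)
      ((pre.length : Int) + 1) x = pre ++ y :: x :: rest := by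
  have h0 : (pre ++ x :: y :: rest).set pre.length y = pre ++ y :: y :: rest := by
    rw [List.set_append]; simp
  have h1 : ((pre.length : Int) + 1) = (((pre ++ [y]).length : Nat) : Int) := by simp
  have h2 : pre ++ y :: y :: rest = (pre ++ [y]) ++ y :: rest := by simp
  have h3 : ((pre ++ [y]) ++ y :: rest).set (pre ++ [y]).length x = (pre ++ [y]) ++ x :: rest := by
    rw [List.set_append]; simp
  simp only [PySem.List.pySetD_natCast, h0, h1, h2, h3]
  simp

lemma fwd_spec (seg : List Int) (hne : seg ≠ []) :
    ∀ (pre post : List Int) (c s : Int),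
    pvFwd (pre ++ seg ++ post) ((pre.length : Int) + seg.length - 1) (pre.length : Int) c s
      = (pre ++ bubF seg ++ post, c + (seg.length : Int) - 1, s + (swF seg : Int)) := by
  induction seg using bubF.induct with
  | case1 => simp at hne
  | case2 x =>
      intro pre post c s
      rw [pvFwd, dif_neg (by simp)]
      simp [bubF, swF]
  | case3 a b t hab ih =>
      intro pre post c s
      have e1 : pre ++ (a :: b :: t) ++ post = pre ++ a :: b :: (t ++ post) := by simp
      rw [pvFwd, dif_pos (by simp; omega)]
      simp only [e1, pyGetD_at_len, pyGetD_at_len1, if_pos hab, swap_at_len]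
      have e2 : pre ++ b :: a :: (t ++ post) = (pre ++ [b]) ++ (a :: t) ++ post := by simp
      rw [e2]
      have er : ((pre.length : Int) + ((a :: b :: t : List Int).length : Int) - 1)
          = (((pre ++ [b]).length : Nat) : Int) + (((a :: t : List Int).length : Nat) : Int) - 1 := by
        simp; push_cast; ring
      have ei : ((pre.length : Int) + 1) = (((pre ++ [b]).length : Nat) : Int) := by simp
      rw [er, ei, ih (by simp) (pre ++ [b]) post (c + 1) (s + 1)]
      simp only [bubF, swF, if_pos hab]
      rw [Prod.mk.injEq, Prod.mk.injEq]
      refine ⟨by simp, by simp; try (push_cast; omega), by simp; try (push_cast; omega)⟩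
  | case4 a b t hab ih =>
      intro pre post c s
      have e1 : pre ++ (a :: b :: t) ++ post = pre ++ a :: b :: (t ++ post) := by simp
      rw [pvFwd, dif_pos (by simp; omega)]
      simp only [e1, pyGetD_at_len, pyGetD_at_len1, if_neg hab]
      have e2 : pre ++ a :: b :: (t ++ post) = (pre ++ [a]) ++ (b :: t) ++ post := by simp
      rw [e2]
      have er : ((pre.length : Int) + ((a :: b :: t : List Int).length : Int) - 1)
          = (((pre ++ [a]).length : Nat) : Int) + (((b :: t : List Int).length : Nat) : Int) - 1 := by
        simp; push_cast; ring
      have ei : ((pre.length : Int) + 1) = (((pre ++ [a]).length : Nat) : Int) := by simp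
      rw [er, ei, ih (by simp) (pre ++ [a]) post (c + 1) s]
      simp only [bubF, swF, if_neg hab]
      rw [Prod.mk.injEq, Prod.mk.injEq]
      refine ⟨by simp, by simp; try (push_cast; omega), by simp; try (push_cast; omega)⟩

lemma bwd_spec (ys : List Int) (hne : ys ≠ []) :
    ∀ (pre post : List Int) (c s : Int),
    pvBwd (pre ++ ys.reverse ++ post) (pre.length : Int) ((pre.length : Int) + ys.length - 1) c s
      = (pre ++ (bubB ys).reverse ++ post, c + (ys.length : Int) - 1, s + (swB ys : Int)) := by
  induction ys using bubB.induct with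
  | case1 => simp at hne
  | case2 x =>
      intro pre post c s
      rw [pvBwd, dif_neg (by simp)]
      simp [bubB, swB]
  | case3 a b t hab ih =>
      intro pre post c s
      have e1 : pre ++ (a :: b :: t).reverse ++ post
          = (pre ++ t.reverse) ++ b :: a :: post := by simp
      have ei1 : ((pre.length : Int) + ((a :: b :: t : List Int).length : Int) - 1) - 1
          = (((pre ++ t.reverse).length : Nat) : Int) := by simp; push_cast; ring
      have ei : ((pre.length : Int) + ((a :: b :: t : List Int).length : Int) - 1)
          = (((pre ++ t.reverse).length : Nat) : Int) + 1 := by simp; push_cast; ring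
      rw [pvBwd, dif_pos (by simp; omega)]
      rw [e1, ei1]
      rw [show ((pre.length : Int) + ((a :: b :: t : List Int).length : Int) - 1)
          = (((pre ++ t.reverse).length : Nat) : Int) + 1 from ei]
      simp only [pyGetD_at_len, pyGetD_at_len1, if_pos hab, swap_at_len]
      have e2 : (pre ++ t.reverse) ++ a :: b :: post
          = pre ++ (a :: t).reverse ++ (b :: post) := by simp
      have ei2 : (((pre ++ t.reverse).length : Nat) : Int)
          = (pre.length : Int) + (((a :: t : List Int).length : Nat) : Int) - 1 := by
        simp; push_cast; ring
      rw [e2, ei2, ih (by simp) pre (b :: post) (c + 1) (s + 1)]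
      simp only [bubB, swB, if_pos hab]
      rw [Prod.mk.injEq, Prod.mk.injEq]
      refine ⟨by simp, by simp; try (push_cast; omega), by simp; try (push_cast; omega)⟩
  | case4 a b t hab ih =>
      intro pre post c s
      have e1 : pre ++ (a :: b :: t).reverse ++ post
          = (pre ++ t.reverse) ++ b :: a :: post := by simp
      have ei1 : ((pre.length : Int) + ((a :: b :: t : List Int).length : Int) - 1) - 1
          = (((pre ++ t.reverse).length : Nat) : Int) := by simp; push_cast; ring
      have ei : ((pre.length : Int) + ((a :: b :: t : List Int).length : Int) - 1)
          = (((pre ++ t.reverse).length : Nat) : Int) + 1 := by simp; push_cast; ring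
      rw [pvBwd, dif_pos (by simp; omega)]
      rw [e1, ei1]
      rw [show ((pre.length : Int) + ((a :: b :: t : List Int).length : Int) - 1)
          = (((pre ++ t.reverse).length : Nat) : Int) + 1 from ei]
      simp only [pyGetD_at_len, pyGetD_at_len1, if_neg hab]
      have e2 : (pre ++ t.reverse) ++ b :: a :: post
          = pre ++ (b :: t).reverse ++ (a :: post) := by simp
      have ei2 : (((pre ++ t.reverse).length : Nat) : Int)
          = (pre.length : Int) + (((b :: t : List Int).length : Nat) : Int) - 1 := by
        simp; push_cast; ring
      rw [e2, ei2, ih (by simp) pre (a :: post) (c + 1) s]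
      simp only [bubB, swB, if_neg hab]
      rw [Prod.mk.injEq, Prod.mk.injEq]
      refine ⟨by simp, by simp; try (push_cast; omega), by simp; try (push_cast; omega)⟩

def tri : Nat → Nat
  | 0 => 0
  | k + 1 => tri k + k

lemma outer_spec (m : Nat) : ∀ (seg pre post : List Int) (c s p : Int),
    seg.length = m → 1 ≤ m →
    ∃ Z : List Int, Z.Perm seg ∧ Z.Pairwise (· ≤ ·) ∧
      pvOuter (pre ++ seg ++ post) (pre.length : Int) ((pre.length : Int) + m - 1) c s p
        = (pre ++ Z ++ post, c + (tri m : Int), s + (inv seg : Int), p + (m : Int) - 1) := by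
  induction m using Nat.strong_induction_on with
  | _ m IH =>
  intro seg pre post c s p hlen hm
  subst hlen
  have hne : seg ≠ [] := by intro h; subst h; simp at hm
  by_cases h1 : seg.length = 1
  · obtain ⟨x, rfl⟩ := List.length_eq_one_iff.1 h1
    refine ⟨[x], .refl _, by simp, ?_⟩
    rw [pvOuter, dif_neg (by simp)]
    simp [tri, inv]
  -- the loop runs: seg.length ≥ 2
  have hm2 : 2 ≤ seg.length := by omega
  rw [pvOuter, dif_pos (by push_cast; omega)]
  rw [fwd_spec seg hne pre post c s]
  obtain ⟨ys, M, he, hle⟩ := bubF_last seg hne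
  have hysl : ys.length + 1 = seg.length := by
    have := (bubF_perm seg).length_eq
    rw [he] at this; simpa using this
  have hymem : ∀ y ∈ ys, y ∈ seg := fun y hy =>
    (bubF_perm seg).subset (by simp [he, hy])
  by_cases h2 : seg.length = 2
  · -- last round: only the forward pass runs
    rw [dif_pos (by push_cast; omega)]
    obtain ⟨u, rfl⟩ : ∃ u, ys = [u] := by
      rcases ys with _ | ⟨u, _ | ⟨v, w⟩⟩ <;> simp_all
    have huM : u ≤ M := hle u (hymem u (by simp))
    have hswinv : inv seg = swF seg := by
      have h3 := bubF_inv seg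
      rw [he] at h3
      have : inv [u, M] = 0 := by
        simp [inv, List.countP_cons]
        omega
      simp [this] at h3
      omega
    refine ⟨bubF seg, bubF_perm seg, by rw [he]; simp [huM], ?_⟩
    rw [he]
    dsimp only
    rw [Prod.mk.injEq, Prod.mk.injEq, Prod.mk.injEq]
    refine ⟨by simp, ?_, ?_, ?_⟩
    · rw [h2, show tri 2 = 1 from rfl]; push_cast; ring
    · rw [hswinv]
    · rw [h2]; push_cast; ring
  -- middle round: backward pass then recursion
  have hm3 : 3 ≤ seg.length := by omega
  rw [dif_neg (by push_cast; omega)]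
  have e1 : pre ++ bubF seg ++ post = pre ++ ys.reverse.reverse ++ (M :: post) := by
    simp [he]
  have er : (pre.length : Int) + (seg.length : Int) - 1 - 1
      = (pre.length : Int) + (ys.reverse.length : Int) - 1 := by
    have hyr : ys.reverse.length = ys.length := by simp
    omega
  rw [e1]
  rw [show ((pre.length : Int) + (seg.length : Int) - 1 - 1)
      = (pre.length : Int) + ((ys.reverse.length : Nat) : Int) - 1 from er]
  have hyne : ys.reverse ≠ [] := by
    intro h
    rw [List.reverse_eq_nil_iff] at h
    subst h
    simp at hysl
    omega
  rw [bwd_spec ys.reverse hyne pre (M :: post) (c + (seg.length : Int) - 1) (s + (swF seg : Int))]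
  obtain ⟨zs, m0, hb, hm0⟩ := bubB_last ys.reverse hyne
  have hzsl : zs.length + 1 = ys.length := by
    have := (bubB_perm ys.reverse).length_eq
    rw [hb] at this; simpa using this
  have hzmem : ∀ z ∈ zs, z ∈ ys := fun z hz => by
    have : z ∈ ys.reverse := (bubB_perm ys.reverse).subset (by simp [hb, hz])
    simpa using this
  have hm0ys : m0 ∈ ys := by
    have : m0 ∈ ys.reverse := (bubB_perm ys.reverse).subset (by simp [hb])
    simpa using this
  have e2 : pre ++ (bubB ys.reverse).reverse ++ (M :: post)
      = (pre ++ [m0]) ++ zs.reverse ++ (M :: post) := by simp [hb]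
  have el : ((pre.length : Int) + 1) = (((pre ++ [m0]).length : Nat) : Int) := by simp
  have er2 : ((pre.length : Int) + ((ys.reverse.length : Nat) : Int) - 1)
      = (((pre ++ [m0]).length : Nat) : Int) + ((seg.length - 2 : Nat) : Int) - 1 := by
    have h5 : (pre ++ [m0]).length = pre.length + 1 := by simp
    have h6 : ys.reverse.length = ys.length := by simp
    omega
  rw [e2, el, er2]
  have hlen2 : zs.reverse.length = seg.length - 2 := by simp; omega
  obtain ⟨Z', hZp, hZs, heq⟩ := IH (seg.length - 2) (by omega) zs.reverse (pre ++ [m0])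
      (M :: post)
      (c + (seg.length : Int) - 1 + ((ys.reverse.length : Nat) : Int) - 1)
      (s + (swF seg : Int) + ((swB ys.reverse : Nat) : Int)) (p + 2) hlen2 (by omega)
  dsimp only
  rw [heq]
  -- membership chains
  have hZmem : ∀ z ∈ Z', z ∈ seg := fun z hz =>
    hymem z (hzmem z (List.mem_reverse.1 (hZp.subset hz)))
  have hMem0 : m0 ∈ seg := hymem m0 hm0ys
  have hm0le : ∀ z ∈ Z', m0 ≤ z := fun z hz =>
    hm0 z (List.mem_reverse.2 (hzmem z (List.mem_reverse.1 (hZp.subset hz))))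
  have hleM : ∀ z ∈ Z', z ≤ M := fun z hz => hle z (hZmem z hz)
  have hm0M : m0 ≤ M := hle m0 hMem0
  refine ⟨m0 :: Z' ++ [M], ?_, ?_, ?_⟩
  · -- permutation
    have p1 : (m0 :: Z' ++ [M]).Perm (m0 :: zs.reverse ++ [M]) :=
      (hZp.append (List.Perm.refl [M])).cons m0
    have p2 : (m0 :: zs.reverse ++ [M]).Perm (ys ++ [M]) := by
      have : (m0 :: zs.reverse).Perm ys := by
        have h4 : m0 :: zs.reverse = (zs ++ [m0]).reverse := by simp
        rw [h4, ← hb]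
        exact ((bubB ys.reverse).reverse_perm.trans (bubB_perm ys.reverse)).trans
          ys.reverse_perm
      exact this.append (List.Perm.refl [M])
    exact (p1.trans p2).trans (he ▸ bubF_perm seg)
  · -- sortedness
    refine List.pairwise_cons.2 ⟨?_, List.pairwise_append.2 ⟨hZs, List.pairwise_singleton _ _, ?_⟩⟩
    · intro y hy
      rcases List.mem_append.1 hy with hy | hy
      · exact hm0le y hy
      · simp at hy; omega
    · intro z hz y hy
      simp at hy
      subst hy
      exact hleM z hz
  · -- statistics
    have hyr : ys.reverse.length = ys.length := by simp
    have hswaps : inv seg = swF seg + swB ys.reverse + inv zs.reverse := by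
      have i1 := bubF_inv seg
      rw [he, inv_append_singleton] at i1
      have c1 : ys.countP (fun y => decide (y > M)) = 0 := by
        rw [List.countP_eq_zero]
        intro y hy
        simp only [decide_eq_true_eq, gt_iff_lt, not_lt]
        exact hle y (hymem y hy)
      rw [c1] at i1
      have i2 : inv ys = invR ys.reverse := by
        have := inv_reverse ys.reverse
        simpa using this
      have i3 := bubB_invR ys.reverse
      rw [hb, invR_append_singleton] at i3
      have c2 : zs.countP (fun y => decide (y < m0)) = 0 := by
        rw [List.countP_eq_zero]
        intro z hz
        simp only [decide_eq_true_eq, not_lt]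
        exact hm0 z (List.mem_reverse.2 (hzmem z hz))
      rw [c2] at i3
      have i4 : invR zs = inv zs.reverse := (inv_reverse zs).symm
      omega
    have ht : tri seg.length = tri (seg.length - 2) + (seg.length - 1) + (seg.length - 2) := by
      obtain ⟨k, hk⟩ : ∃ k, seg.length = k + 2 := ⟨seg.length - 2, by omega⟩
      rw [hk]
      simp [tri]
      omega
    rw [Prod.mk.injEq, Prod.mk.injEq, Prod.mk.injEq]
    refine ⟨by simp, by omega, by omega, by omega⟩

lemma two_tri (m : Nat) : 2 * tri m = m * (m - 1) := by
  induction m with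
  | zero => simp [tri]
  | succ k ih =>
      cases k with
      | zero => simp [tri]
      | succ j =>
          simp only [tri] at ih ⊢
          simp only [Nat.add_sub_cancel] at ih ⊢
          nlinarith

lemma altInvAux_eq (xs : List Int) : ∀ t : Int, altInvAux xs t = t + (inv xs : Int) := by
  induction xs with
  | nil => intro t; simp [altInvAux, inv]
  | cons x xs ih =>
      intro t
      simp only [altInvAux, inv, ih]
      push_cast
      ring

-- ===== VERDICT (by name: the statement is the Claim_ definition above) =====
theorem shaker_sort_with_stats_spec : Claim_equal_shaker_sort_with_stats := by
  unfold Claim_equal_shaker_sort_with_stats Spec_shaker_sort_with_stats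
  intro array _
  by_cases h : array.length ≤ 1
  · -- 0 or 1 element: A returns early; B's stats are all 0 and sorting fixes nothing
    rcases array with _ | ⟨x, _ | ⟨y, t⟩⟩
    · decide
    · have h1 : PySem.List.sorted [x] (fun z => z) false = [x] :=
        PySem.List.sorted_eq_self_of_pairwise [x] (fun z => z) (by simp)
      simp [shaker_sort_with_stats, shaker_sort_with_stats_alt, altInvAux, h1,
        show PySem.Int.floordiv (1 * (1 - 1)) 2 = 0 from rfl]
    · simp at h
  · -- at least 2 elements: the outer-loop characterisation
    obtain ⟨Z, hperm, hsort, heq⟩ := outer_spec array.length array [] [] 0 0 0 rfl (by omega)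
    simp only [List.append_nil, List.nil_append, List.length_nil, Nat.cast_zero,
      zero_add] at heq
    rw [shaker_sort_with_stats, shaker_sort_with_stats_alt]
    simp only [PySem.List.len_eq]
    rw [if_neg (by exact_mod_cast (by omega : ¬ (array.length : Int) ≤ 1))]
    rw [heq]
    have hZ : PySem.List.sorted array (fun z => z) false = Z :=
      PySem.List.sorted_id_eq_of_perm_of_pairwise array Z hperm hsort
    have htri : (array.length * (array.length - 1)) / 2 = tri array.length := by
      have := two_tri array.length
      omega
    have hcast : (array.length : Int) * ((array.length : Int) - 1)
        = ((array.length * (array.length - 1) : Nat) : Int) := by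
      push_cast [Nat.cast_sub (by omega : 1 ≤ array.length)]
      ring
    have hfd : PySem.Int.floordiv ((array.length : Int) * ((array.length : Int) - 1)) 2
        = (tri array.length : Int) := by
      rw [hcast]
      rw [show ((array.length * (array.length - 1) : Nat) : Int)
            = ((array.length * (array.length - 1) : Nat) : Int) from rfl]
      have := PySem.Int.floordiv_natCast (array.length * (array.length - 1)) 2
      rw [show ((2 : Nat) : Int) = (2 : Int) from rfl] at this
      rw [this, htri]
    have hinv := altInvAux_eq array 0
    have hmax : max ((array.length : Int) - 1) 0 = (array.length : Int) - 1 :=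
      max_eq_left (by omega)
    rw [Prod.mk.injEq]
    refine ⟨hZ.symm, ?_⟩
    simp only [List.cons.injEq, Prod.mk.injEq]
    refine ⟨⟨trivial, by omega⟩, ⟨trivial, by rw [hinv]; try ring⟩, ⟨trivial, by rw [hmax]; try ring⟩, trivial⟩
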